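-- pv_equiv track=rewrite | github.com/ZeroNerodaHero/graph_eigen | app.py | polytounicode
-- ===== SOURCE A (Python) =====
-- def polytounicode(str):
--     conversion = {
--         "0": "⁰",
--         "1": "¹",
--         "2": "²",
--         "3": "³",
--         "4": "⁴",
--         "5": "⁵",
--         "6": "⁶",
--         "7": "⁷",
--         "8": "⁸",
--         "9": "⁹",
--         "-": "⁻",
--         "+": "⁺",
--         ".": "·"
--     }
--     #state = 0 means has not found the ^ yet
--     #state = 1 means has found the ^ and is currently converting the number
--
--     state = 0
--     ret = ""
--     for it in str:
--         if it == "^":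
--             state = 1
--             continue
--         if state == 1:
--             if it.isdigit():
--                 ret += conversion[it]
--             else:
--                 state = 0
--                 ret += it
--         else:
--             ret += it
--     return ret
-- ===== SOURCE B (Python) =====
-- def polytounicode(str):
--     sup = {
--         "0": "\u2070", "1": "\u00b9", "2": "\u00b2", "3": "\u00b3",
--         "4": "\u2074", "5": "\u2075", "6": "\u2076", "7": "\u2077",
--         "8": "\u2078", "9": "\u2079",
--     }
--     pieces = str.split('^')
--     parts = [pieces[0]]
--     for p in pieces[1:]:
--         i = 0
--         while i < len(p) and p[i].isdigit():
--             i += 1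
--         parts.append(''.join(sup[c] for c in p[:i]) + p[i:])
--     return ''.join(parts)
-- ===== Notes on version B (the rewrite author's own statement) =====
-- stated objective: faster
-- what changed: Replaced A's per-character flag-based state machine with a split-on-the-caret-separator decomposition: emit the first piece verbatim, and for each later piece map its leading digit run through the superscript table and keep the rest verbatim, then join; the bulk of the work moves into C-level str.split/slicing.
import Mathlib
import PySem

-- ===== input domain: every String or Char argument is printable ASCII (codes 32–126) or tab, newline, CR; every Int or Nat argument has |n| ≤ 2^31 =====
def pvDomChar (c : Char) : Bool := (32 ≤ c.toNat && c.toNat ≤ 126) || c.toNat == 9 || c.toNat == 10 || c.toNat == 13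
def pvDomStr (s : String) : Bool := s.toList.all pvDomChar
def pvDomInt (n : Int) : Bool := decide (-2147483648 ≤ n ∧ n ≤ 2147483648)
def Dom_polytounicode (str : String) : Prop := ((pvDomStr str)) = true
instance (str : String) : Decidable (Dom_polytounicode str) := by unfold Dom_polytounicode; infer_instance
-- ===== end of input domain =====

-- B replaces A's per-character flag-based state machine by a split-on-the-caret-separator decomposition
-- (emit the first piece verbatim, convert the leading digit run of each later piece); measured faster (constant factor).


-- ===== PORT A =====
-- A's conversion dict as a total lookup (keys '0'-'9','-','+','.'); the default branch is
-- unreachable in A, whose lookup is guarded by isdigit (exact on the ASCII domain, where no KeyError occurs).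
def pvConvA (c : Char) : Char :=
  if c = '0' then '⁰' else if c = '1' then '¹' else if c = '2' then '²' else
  if c = '3' then '³' else if c = '4' then '⁴' else if c = '5' then '⁵' else
  if c = '6' then '⁶' else if c = '7' then '⁷' else if c = '8' then '⁸' else
  if c = '9' then '⁹' else if c = '-' then '⁻' else if c = '+' then '⁺' else
  if c = '.' then '·' else c

-- the body of A's loop; state component: (state == 1, ret)
def pvStepA (p : Bool × List Char) (it : Char) : Bool × List Char :=
  if it = '^' then (true, p.2)
  else if p.1 then
    (if PySem.Chars.isdigit it then (true, p.2 ++ [pvConvA it]) else (false, p.2 ++ [it]))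
  else (p.1, p.2 ++ [it])

def polytounicode (str : String) : String :=
  String.ofList (str.toList.foldl pvStepA (false, [])).2

-- ===== PORT B =====
-- B's sup dict (keys '0'-'9' only) as a total lookup; default unreachable (guarded by isdigit)
def pvSup (c : Char) : Char :=
  if c = '0' then '⁰' else if c = '1' then '¹' else if c = '2' then '²' else
  if c = '3' then '³' else if c = '4' then '⁴' else if c = '5' then '⁵' else
  if c = '6' then '⁶' else if c = '7' then '⁷' else if c = '8' then '⁸' else
  if c = '9' then '⁹' else c

-- one piece after a '^': the leading digit run (Source B's while-loop scan) mapped through sup, the rest kept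
def pvSeg (p : List Char) : List Char :=
  (p.takeWhile PySem.Chars.isdigit).map pvSup ++ p.dropWhile PySem.Chars.isdigit

def polytounicode_alt (str : String) : String :=
  match PySem.Chars.splitOn str.toList ['^'] with
  | [] => ""            -- unreachable: str.split('^') never returns an empty list
  | p0 :: rest => String.ofList (p0 ++ (rest.map pvSeg).flatten)

-- ===== PRECONDITION & SPEC =====
def Spec_polytounicode (str : String) (out : String) : Prop := out = polytounicode_alt str
instance (str : String) (out : String) : Decidable (Spec_polytounicode str out) := by unfold Spec_polytounicode; infer_instance

-- ===== CLAIM (what is proved, stated in full; the proofs are below) =====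
def Claim_equal_polytounicode : Prop := ∀ (str : String), Dom_polytounicode str → Spec_polytounicode str (polytounicode str)

-- ===== LEMMAS AND PROOFS =====

-- A's state machine as a structural recursion (proof-only reformulation of the foldl)
def pvGoA : Bool → List Char → List Char
  | _, [] => []
  | b, c :: cs =>
    if c = '^' then pvGoA true cs
    else if b then
      (if PySem.Chars.isdigit c then pvConvA c :: pvGoA true cs else c :: pvGoA false cs)
    else c :: pvGoA false cs

lemma pv_foldA (cs : List Char) : ∀ (b : Bool) (acc : List Char),
    (cs.foldl pvStepA (b, acc)).2 = acc ++ pvGoA b cs := by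
  induction cs with
  | nil => intro b acc; simp [pvGoA]
  | cons c cs ih =>
    intro b acc
    by_cases h : c = '^'
    · subst h; simp [pvStepA, pvGoA, ih]
    · cases b with
      | false => simp [pvStepA, h, pvGoA, ih]
      | true =>
        by_cases hd : PySem.Chars.isdigit c
        · simp [pvStepA, h, hd, pvGoA, ih]
        · simp [pvStepA, h, hd, pvGoA, ih]

-- split on '^' as a structural recursion: (first piece, later pieces)
def pvSp : List Char → List Char × List (List Char)
  | [] => ([], [])
  | c :: r => if c = '^' then ([], (pvSp r).1 :: (pvSp r).2)
              else (c :: (pvSp r).1, (pvSp r).2)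

set_option maxRecDepth 10000 in
lemma pv_go_spec : ∀ (l : List Char) (fuel : Nat) (cur : List Char) (acc : List (List Char)),
    l.length < fuel →
    PySem.Chars.splitOn.go ['^'] fuel l cur acc
      = acc.reverse ++ (cur.reverse ++ (pvSp l).1) :: (pvSp l).2 := by
  intro l
  induction l with
  | nil =>
    intro fuel cur acc h
    cases fuel with
    | zero => omega
    | succ f =>
      have hstep : PySem.Chars.splitOn.go ['^'] (f + 1) [] cur acc
          = (cur.reverse :: acc).reverse := rfl
      simp [hstep, pvSp]
  | cons c r ih =>
    intro fuel cur acc h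
    cases fuel with
    | zero => omega
    | succ f =>
      have hstep : PySem.Chars.splitOn.go ['^'] (f + 1) (c :: r) cur acc
          = if (['^'] : List Char).isPrefixOf (c :: r)
            then PySem.Chars.splitOn.go ['^'] f (List.drop (['^'] : List Char).length (c :: r)) [] (cur.reverse :: acc)
            else PySem.Chars.splitOn.go ['^'] f r (c :: cur) acc := rfl
      rw [hstep]
      by_cases hc : c = '^'
      · subst hc
        rw [if_pos (by simp [List.isPrefixOf])]
        simp only [List.length_cons, List.length_nil, List.drop_succ_cons, List.drop_zero]
        rw [ih f [] (List.reverse cur :: acc) (by simpa using Nat.lt_of_succ_lt_succ h)]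
        have hsp : pvSp ('^' :: r) = ([], (pvSp r).1 :: (pvSp r).2) := rfl
        rw [hsp]
        simp
      · rw [if_neg (by
          intro hcontra
          simp [List.isPrefixOf] at hcontra
          exact hc hcontra.symm)]
        rw [ih f (c :: cur) acc (by simpa using Nat.lt_of_succ_lt_succ h)]
        simp [pvSp, hc]

lemma pv_splitOn_eq (l : List Char) :
    PySem.Chars.splitOn l ['^'] = (pvSp l).1 :: (pvSp l).2 := by
  have := pv_go_spec l (l.length + 1) [] [] (by omega)
  simpa [PySem.Chars.splitOn] using this

lemma pv_conv_eq_sup (c : Char) (h : PySem.Chars.isdigit c = true) : pvConvA c = pvSup c := by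
  have hm : c ≠ '-' := by rintro rfl; exact absurd h (by decide)
  have hp : c ≠ '+' := by rintro rfl; exact absurd h (by decide)
  have hdot : c ≠ '.' := by rintro rfl; exact absurd h (by decide)
  unfold pvConvA pvSup
  rw [if_neg hm, if_neg hp, if_neg hdot]

lemma pv_seg_digit (c : Char) (h : PySem.Chars.isdigit c = true) (p : List Char) :
    pvSeg (c :: p) = pvSup c :: pvSeg p := by
  simp [pvSeg, h]

lemma pv_seg_nondigit (c : Char) (h : PySem.Chars.isdigit c = false) (p : List Char) :
    pvSeg (c :: p) = c :: p := by
  simp [pvSeg, h]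

lemma pv_goA_sp (l : List Char) :
    pvGoA false l = (pvSp l).1 ++ (((pvSp l).2).map pvSeg).flatten
  ∧ pvGoA true l = pvSeg (pvSp l).1 ++ (((pvSp l).2).map pvSeg).flatten := by
  induction l with
  | nil => simp [pvGoA, pvSp, pvSeg]
  | cons c r ih =>
    obtain ⟨ihF, ihT⟩ := ih
    by_cases hc : c = '^'
    · subst hc
      refine ⟨?_, ?_⟩
      · simp [pvGoA, pvSp, pvSeg, ihT]
      · simp [pvGoA, pvSp, pvSeg, ihT]
    · by_cases hd : PySem.Chars.isdigit c
      · refine ⟨?_, ?_⟩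
        · simp [pvGoA, hc, pvSp, ihF]
        · simp [pvGoA, hc, hd, pvSp, pv_seg_digit c hd, ihT, pv_conv_eq_sup c hd]
      · refine ⟨?_, ?_⟩
        · simp [pvGoA, hc, pvSp, ihF]
        · simp [pvGoA, hc, hd, pvSp, pv_seg_nondigit c (by simpa using hd), ihF]

-- ===== VERDICT (by name: the statement is the Claim_ definition above) =====
theorem polytounicode_spec : Claim_equal_polytounicode := by
  intro s _hdom
  unfold Spec_polytounicode polytounicode polytounicode_alt
  rw [pv_splitOn_eq]
  rw [pv_foldA s.toList false []]
  rw [(pv_goA_sp s.toList).1]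
  simp
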